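-- pv_equiv track=rewrite | github.com/LunaMoonax/Target-search | workflow/scripts/validate_primers.py | check_palindromes
-- ===== SOURCE A (Python) =====
-- def check_palindromes(sequence):
--     """Check for palindromic sequences"""
--     complement = {'A': 'T', 'T': 'A', 'G': 'C', 'C': 'G'}
--     max_score = 0
--
--     for length in range(6, min(len(sequence) + 1, 12)):
--         for start in range(len(sequence) - length + 1):
--             subseq = sequence[start:start + length]
--             rev_comp = ''.join(complement.get(base, 'N') for base in subseq[::-1])
--             if subseq == rev_comp:
--                 max_score = max(max_score, length)
--
--     return max_score
-- ===== SOURCE B (Python) =====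
-- def check_palindromes(sequence):
--     """Check for palindromic sequences (center-expansion reformulation)."""
--     complement = {'A': 'T', 'T': 'A', 'G': 'C', 'C': 'G'}
--     n = len(sequence)
--     best = 0
--
--     def pair_ok(l, r):
--         return (sequence[l] == complement.get(sequence[r], 'N')
--                 and sequence[r] == complement.get(sequence[l], 'N'))
--
--     # even-length palindromes: expand around each gap, length capped at 10
--     for c in range(1, n):
--         l, r, length = c - 1, c, 0
--         while l >= 0 and r < n and length < 10 and pair_ok(l, r):
--             length += 2
--             l -= 1
--             r += 1
--         if length >= 6:
--             best = max(best, length)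
--
--     # odd-length palindromes: the center base must equal its own complement
--     for c in range(n):
--         if sequence[c] == complement.get(sequence[c], 'N'):
--             l, r, length = c - 1, c + 1, 1
--             while l >= 0 and r < n and length < 11 and pair_ok(l, r):
--                 length += 2
--                 l -= 1
--                 r += 1
--             if length >= 6:
--                 best = max(best, length)
--
--     return best
-- ===== Notes on version B (the rewrite author's own statement) =====
-- stated objective: faster
-- what changed: Instead of testing every (length, start) substring against its reverse complement, B expands outward around each even/odd palindrome center once, capping the matched length at 10 (even) / 11 (odd) and keeping the running maximum of lengths >= 6.
import Mathlib
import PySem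

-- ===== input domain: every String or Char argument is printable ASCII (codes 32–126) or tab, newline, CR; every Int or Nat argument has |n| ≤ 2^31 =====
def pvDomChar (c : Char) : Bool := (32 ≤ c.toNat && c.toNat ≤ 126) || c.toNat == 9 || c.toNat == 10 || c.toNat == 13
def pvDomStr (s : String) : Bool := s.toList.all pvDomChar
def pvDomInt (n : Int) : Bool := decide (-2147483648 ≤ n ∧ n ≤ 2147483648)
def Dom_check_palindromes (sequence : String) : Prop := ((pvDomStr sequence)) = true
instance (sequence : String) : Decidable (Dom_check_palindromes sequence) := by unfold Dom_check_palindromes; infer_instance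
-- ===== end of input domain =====

-- B replaces A's scan over all (length, start) substrings by a single center-expansion
-- pass (even/odd centers, lengths capped at 10/11); measured faster by a constant factor.

-- ===== PORT A =====
-- literal port of A: for length in range(6, min(len+1,12)): for start in range(...):
-- subseq[::-1] is List.reverse (PySem.List.slice?_none_none_neg_one); ''.join(gen) over it is List.map.
def check_palindromes (sequence : String) : Int :=
  let complement : PySem.Dict Char Char := PySem.Dict.ofList [('A','T'),('T','A'),('G','C'),('C','G')]
  let s := sequence.toList
  (PySem.List.pyRange 6 (min (PySem.List.len s + 1) 12) 1).foldl (fun max_score length =>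
    (PySem.List.pyRange 0 (PySem.List.len s - length + 1) 1).foldl (fun max_score start =>
      let subseq := PySem.List.slice s (some start) (some (start + length))
      let rev_comp := subseq.reverse.map (fun base => PySem.Dict.getD complement base 'N')
      if subseq = rev_comp then max max_score length else max_score) max_score) 0

-- ===== PORT B =====
-- complement.get(base, 'N')
def pvComp (base : Char) : Char :=
  PySem.Dict.getD (PySem.Dict.ofList [('A','T'),('T','A'),('G','C'),('C','G')]) base 'N'

-- pair_ok(l, r); only evaluated under the loop guard 0 ≤ l ∧ r < len, where pyGetD is s[l]/s[r]
def pvPairOk (s : List Char) (l r : Int) : Bool :=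
  (PySem.List.pyGetD s l 'N' == pvComp (PySem.List.pyGetD s r 'N')) &&
  (PySem.List.pyGetD s r 'N' == pvComp (PySem.List.pyGetD s l 'N'))

-- the while loop, as fuel recursion: fuel = (cap - length) / 2 remaining steps,
-- so 'length < cap' is exactly 'fuel > 0'
def pvExpand (s : List Char) (l r : Int) (length : Nat) : Nat → Nat
  | 0 => length
  | fuel + 1 =>
    if 0 ≤ l ∧ r < PySem.List.len s ∧ pvPairOk s l r then
      pvExpand s (l - 1) (r + 1) (length + 2) fuel
    else length

def check_palindromes_alt (sequence : String) : Int :=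
  let s := sequence.toList
  let n : Int := PySem.List.len s
  let bestE := (PySem.List.pyRange 1 n 1).foldl (fun best c =>
      let e : Int := (pvExpand s (c - 1) c 0 5 : Nat)
      if 6 ≤ e then max best e else best) 0
  (PySem.List.pyRange 0 n 1).foldl (fun best c =>
      if PySem.List.pyGetD s c 'N' = pvComp (PySem.List.pyGetD s c 'N') then
        let e : Int := (pvExpand s (c - 1) (c + 1) 1 5 : Nat)
        if 6 ≤ e then max best e else best
      else best) bestE

-- ===== PRECONDITION & SPEC =====
def Spec_check_palindromes (sequence : String) (out : Int) : Prop := out = check_palindromes_alt sequence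
instance (sequence : String) (out : Int) : Decidable (Spec_check_palindromes sequence out) := by unfold Spec_check_palindromes; infer_instance

-- ===== CLAIM (what is proved, stated in full; the proofs are below) =====
def Claim_equal_check_palindromes : Prop := ∀ (sequence : String), Dom_check_palindromes sequence → Spec_check_palindromes sequence (check_palindromes sequence)

-- ===== LEMMAS AND PROOFS =====

def pvPal (s : List Char) (st L : Nat) : Prop :=
  ∀ k < L, s.getD (st + k) 'N' = pvComp (s.getD (st + (L - 1 - k)) 'N')

lemma pvSlice_iff (s : List Char) (st L : Nat) (h : st + L ≤ s.length) :
    ((s.drop st).take L = ((s.drop st).take L).reverse.map pvComp) ↔ pvPal s st L := by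
  have hlen : ((s.drop st).take L).length = L := by
    simp [List.length_take, List.length_drop]; omega
  constructor
  · intro heq k hk
    have : ((s.drop st).take L)[k]'(by omega) = (((s.drop st).take L).reverse.map pvComp)[k]'(by simp; omega) :=
      List.getElem_of_eq heq _
    rw [List.getElem_map, List.getElem_reverse] at this
    have h1 : ((s.drop st).take L)[k]'(by omega) = s.getD (st + k) 'N' := by
      rw [List.getElem_take, List.getElem_drop, List.getD_eq_getElem s 'N' (by omega)]
    have h2 : ((s.drop st).take L)[((s.drop st).take L).length - 1 - k]'(by omega) = s.getD (st + (L - 1 - k)) 'N' := by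
      rw [List.getElem_take, List.getElem_drop, List.getD_eq_getElem s 'N' (by omega)]
      congr 1; omega
    rw [h1, h2] at this
    exact this
  · intro hp
    apply List.ext_getElem (by simp [hlen]; omega)
    intro k hk1 hk2
    rw [List.getElem_map, List.getElem_reverse]
    have hkL : k < L := by omega
    have h1 : ((s.drop st).take L)[k]'hk1 = s.getD (st + k) 'N' := by
      rw [List.getElem_take, List.getElem_drop, List.getD_eq_getElem s 'N' (by omega)]
    have h2 : ((s.drop st).take L)[((s.drop st).take L).length - 1 - k]'(by omega) = s.getD (st + (L - 1 - k)) 'N' := by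
      rw [List.getElem_take, List.getElem_drop, List.getD_eq_getElem s 'N' (by omega)]
      congr 1; omega
    rw [h1, h2]
    exact hp k hkL

def pvPOk (s : List Char) (l r : Nat) : Prop :=
  s.getD l 'N' = pvComp (s.getD r 'N') ∧ s.getD r 'N' = pvComp (s.getD l 'N')

lemma pvPairOk_iff (s : List Char) (l r : Nat) :
    pvPairOk s (l : Int) (r : Int) = true ↔ pvPOk s l r := by
  simp [pvPairOk, pvPOk, PySem.List.pyGetD_natCast]

lemma pvPal_even_iff (s : List Char) (st d : Nat) :
    pvPal s st (2 * d) ↔ ∀ j < d, pvPOk s (st + (d - 1 - j)) (st + (d + j)) := by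
  constructor
  · intro hp j hj
    constructor
    · have h1 := hp (d - 1 - j) (by omega)
      have e : 2 * d - 1 - (d - 1 - j) = d + j := by omega
      rwa [e] at h1
    · have h2 := hp (d + j) (by omega)
      have e : 2 * d - 1 - (d + j) = d - 1 - j := by omega
      rwa [e] at h2
  · intro hq k hk
    by_cases hkd : k < d
    · have := (hq (d - 1 - k) (by omega)).1
      have e1 : d - 1 - (d - 1 - k) = k := by omega
      have e2 : d + (d - 1 - k) = 2 * d - 1 - k := by omega
      rw [e1, e2] at this
      exact this
    · have := (hq (k - d) (by omega)).2
      have e1 : d + (k - d) = k := by omega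
      have e2 : d - 1 - (k - d) = 2 * d - 1 - k := by omega
      rw [e1, e2] at this
      exact this

lemma pvPal_odd_iff (s : List Char) (st d : Nat) :
    pvPal s st (2 * d + 1) ↔
      (s.getD (st + d) 'N' = pvComp (s.getD (st + d) 'N')) ∧
      ∀ j < d, pvPOk s (st + (d - 1 - j)) (st + (d + 1 + j)) := by
  constructor
  · intro hp
    refine ⟨?_, ?_⟩
    · have := hp d (by omega)
      have e : 2 * d + 1 - 1 - d = d := by omega
      rwa [e] at this
    · intro j hj
      constructor
      · have h1 := hp (d - 1 - j) (by omega)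
        have e : 2 * d + 1 - 1 - (d - 1 - j) = d + 1 + j := by omega
        rwa [e] at h1
      · have h2 := hp (d + 1 + j) (by omega)
        have e : 2 * d + 1 - 1 - (d + 1 + j) = d - 1 - j := by omega
        rwa [e] at h2
  · rintro ⟨hc, hq⟩ k hk
    by_cases hkd : k < d
    · have := (hq (d - 1 - k) (by omega)).1
      have e1 : d - 1 - (d - 1 - k) = k := by omega
      have e2 : d + 1 + (d - 1 - k) = 2 * d + 1 - 1 - k := by omega
      rw [e1, e2] at this
      exact this
    · by_cases hke : k = d
      · rw [hke]
        have e : 2 * d + 1 - 1 - d = d := by omega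
        rw [e]
        exact hc
      · have := (hq (k - d - 1) (by omega)).2
        have e1 : d + 1 + (k - d - 1) = k := by omega
        have e2 : d - 1 - (k - d - 1) = 2 * d + 1 - 1 - k := by omega
        rw [e1, e2] at this
        exact this

lemma pvExpand_sound (s : List Char) :
    ∀ (f : Nat) (l r : Int) (len : Nat), ∃ m, m ≤ f ∧
      pvExpand s l r len f = len + 2 * m ∧
      ∀ j : Nat, j < m → 0 ≤ l - (j : Int) ∧ r + (j : Int) < (s.length : Int) ∧ pvPairOk s (l - (j : Int)) (r + (j : Int)) = true := by
  intro f
  induction f with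
  | zero =>
    intro l r len
    exact ⟨0, le_refl 0, by simp [pvExpand], by omega⟩
  | succ f ih =>
    intro l r len
    by_cases hg : 0 ≤ l ∧ r < PySem.List.len s ∧ pvPairOk s l r
    · obtain ⟨m, hm, he, hj⟩ := ih (l - 1) (r + 1) (len + 2)
      refine ⟨m + 1, by omega, ?_, ?_⟩
      · rw [pvExpand, if_pos hg, he]; omega
      · intro j hjm
        match j with
        | 0 =>
          simpa [PySem.List.len_eq] using hg
        | j + 1 =>
          have h := hj j (by omega)
          push_cast
          have e1 : l - ((j : Int) + 1) = l - 1 - j := by ring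
          have e2 : r + ((j : Int) + 1) = r + 1 + j := by ring
          rw [e1, e2]
          exact h
    · refine ⟨0, by omega, ?_, by omega⟩
      rw [pvExpand, if_neg hg]; omega

lemma le_pvExpand (s : List Char) :
    ∀ (f : Nat) (l r : Int) (len : Nat), len ≤ pvExpand s l r len f := by
  intro f
  induction f with
  | zero => intro l r len; simp [pvExpand]
  | succ f ih =>
    intro l r len
    rw [pvExpand]
    split
    · exact le_trans (by omega) (ih (l-1) (r+1) (len+2))
    · exact le_refl _

lemma pvExpand_complete (s : List Char) :
    ∀ (f : Nat) (l r : Int) (len m : Nat), m ≤ f →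
      (∀ j : Nat, j < m → 0 ≤ l - (j : Int) ∧ r + (j : Int) < (s.length : Int) ∧ pvPairOk s (l - (j : Int)) (r + (j : Int)) = true) →
      len + 2 * m ≤ pvExpand s l r len f := by
  intro f
  induction f with
  | zero => intro l r len m hm _; interval_cases m; simp [pvExpand]
  | succ f ih =>
    intro l r len m hm hc
    match m with
    | 0 => simpa using le_pvExpand s (f+1) l r len
    | m + 1 =>
      have h0 := hc 0 (by omega)
      have hg : 0 ≤ l ∧ r < PySem.List.len s ∧ pvPairOk s l r = true := by
        simpa [PySem.List.len_eq] using h0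
      rw [pvExpand, if_pos hg]
      have hrec : len + 2 + 2 * m ≤ pvExpand s (l-1) (r+1) (len+2) f := by
        apply ih _ _ _ m (by omega)
        intro j hj
        have h := hc (j + 1) (by omega)
        push_cast at h ⊢
        have e1 : l - ((j : Int) + 1) = l - 1 - j := by ring
        have e2 : r + ((j : Int) + 1) = r + 1 + j := by ring
        rw [e1, e2] at h
        exact h
      omega

-- A's per-length condition: some start position carries a reverse-complement palindrome
abbrev pvPA (s : List Char) (L : Int) : Prop :=
  ∃ stI ∈ PySem.List.pyRange 0 ((s.length : Int) - L + 1) 1,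
    PySem.List.slice s (some stI) (some (stI + L))
      = (PySem.List.slice s (some stI) (some (stI + L))).reverse.map pvComp

lemma pvPA_iff (s : List Char) (L : Nat) :
    pvPA s (L : Int) ↔ ∃ st : Nat, st + L ≤ s.length ∧ pvPal s st L := by
  constructor
  · rintro ⟨stI, hmem, heq⟩
    rw [PySem.List.mem_pyRange_one] at hmem
    obtain ⟨h0, h1⟩ := hmem
    set st : Nat := stI.toNat with hst
    have hcast : stI = (st : Int) := by omega
    have hb : st + L ≤ s.length := by omega
    refine ⟨st, hb, ?_⟩
    rw [hcast, ← Int.natCast_add, PySem.List.slice_natCast] at heq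
    have e : st + L - st = L := by omega
    rw [e] at heq
    exact (pvSlice_iff s st L hb).mp heq
  · rintro ⟨st, hb, hp⟩
    refine ⟨(st : Int), ?_, ?_⟩
    · rw [PySem.List.mem_pyRange_one]; omega
    · rw [← Int.natCast_add, PySem.List.slice_natCast]
      have e : st + L - st = L := by omega
      rw [e]
      exact (pvSlice_iff s st L hb).mpr hp


-- an inner scan 'if hit: score = max(score, L)' is one conditional max over the range
lemma pvFoldl_ifmax {α : Type} (p : α → Prop) [DecidablePred p] (L : Int) :
    ∀ (xs : List α) (a : Int),
      xs.foldl (fun acc x => if p x then max acc L else acc) a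
        = if ∃ x ∈ xs, p x then max a L else a := by
  intro xs
  induction xs with
  | nil => intro a; simp
  | cons x t ih =>
    intro a
    by_cases hx : p x
    · simp [List.foldl_cons, hx, ih]
    · simp [List.foldl_cons, hx, ih]

-- bounds for conditional-max folds
lemma pvCmax_le {α : Type} (p : α → Prop) [DecidablePred p] (f : α → Int) :
    ∀ (xs : List α) (a K : Int), a ≤ K → (∀ x ∈ xs, p x → f x ≤ K) →
      xs.foldl (fun acc x => if p x then max acc (f x) else acc) a ≤ K := by
  intro xs
  induction xs with
  | nil => intro a K ha _; simpa using ha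
  | cons x t ih =>
    intro a K ha h
    simp only [List.foldl_cons]
    by_cases hx : p x
    · simp only [hx, if_pos]
      exact ih _ _ (max_le ha (h x (by simp) hx)) (fun y hy => h y (by simp [hy]))
    · simp only [hx, if_neg, not_false_iff]
      exact ih _ _ ha (fun y hy => h y (by simp [hy]))

lemma pvLe_cmax_init {α : Type} (p : α → Prop) [DecidablePred p] (f : α → Int) :
    ∀ (xs : List α) (a : Int), a ≤ xs.foldl (fun acc x => if p x then max acc (f x) else acc) a := by
  intro xs
  induction xs with
  | nil => intro a; simp
  | cons x t ih =>
    intro a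
    simp only [List.foldl_cons]
    by_cases hx : p x
    · simp only [hx, if_pos]
      exact le_trans (le_max_left a (f x)) (ih _)
    · simpa [hx] using ih a

lemma pvLe_cmax_mem {α : Type} (p : α → Prop) [DecidablePred p] (f : α → Int) :
    ∀ (xs : List α) (a : Int) (x : α), x ∈ xs → p x →
      f x ≤ xs.foldl (fun acc y => if p y then max acc (f y) else acc) a := by
  intro xs
  induction xs with
  | nil => intro a x hx; simp at hx
  | cons y t ih =>
    intro a x hx hp
    simp only [List.foldl_cons]
    rcases List.mem_cons.mp hx with h | h
    · subst h
      simp only [hp, if_pos]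
      exact le_trans (le_max_right a (f x)) (pvLe_cmax_init p f t _)
    · by_cases hy : p y <;> simp only [hy, if_pos, if_neg, not_false_iff] <;> exact ih _ x h hp

-- even/odd center expansion values (Int-valued, as the B port computes them)
def pvEE (s : List Char) (c : Int) : Int := (pvExpand s (c - 1) c 0 5 : Nat)
def pvEO (s : List Char) (c : Int) : Int := (pvExpand s (c - 1) (c + 1) 1 5 : Nat)

-- a counted even center yields a palindrome of exactly its value
lemma pvEven_sound (s : List Char) (c : Int) (h1 : 1 ≤ c) (h6 : 6 ≤ pvEE s c) :
    ∃ st : Nat, ∃ m : Nat, 3 ≤ m ∧ m ≤ 5 ∧ pvEE s c = ((2 * m : Nat) : Int) ∧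
      st + 2 * m ≤ s.length ∧ pvPal s st (2 * m) := by
  obtain ⟨m, hm5, he, hp⟩ := pvExpand_sound s 5 (c - 1) c 0
  have hv : pvEE s c = ((2 * m : Nat) : Int) := by simp [pvEE, he]
  have hm3 : 3 ≤ m := by omega
  have hcm : (m : Int) ≤ c := by
    have := (hp (m - 1) (by omega)).1
    omega
  have hn : c + (m : Int) ≤ (s.length : Int) := by
    have := (hp (m - 1) (by omega)).2.1
    omega
  refine ⟨c.toNat - m, m, hm3, hm5, hv, by omega, ?_⟩
  rw [pvPal_even_iff]
  intro j hj
  have h := (hp j hj).2.2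
  have e1 : c - 1 - (j : Int) = ((c.toNat - m + (m - 1 - j) : Nat) : Int) := by push_cast; omega
  have e2 : c + (j : Int) = ((c.toNat - m + (m + j) : Nat) : Int) := by push_cast; omega
  rw [e1, e2] at h
  exact (pvPairOk_iff s _ _).mp h

-- a counted odd center yields a palindrome of exactly its value
lemma pvOdd_sound (s : List Char) (c : Int) (h0 : 0 ≤ c) (_h2 : c < (s.length : Int))
    (hcc : PySem.List.pyGetD s c 'N' = pvComp (PySem.List.pyGetD s c 'N'))
    (h6 : 6 ≤ pvEO s c) :
    ∃ st : Nat, ∃ m : Nat, 3 ≤ m ∧ m ≤ 5 ∧ pvEO s c = ((2 * m + 1 : Nat) : Int) ∧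
      st + (2 * m + 1) ≤ s.length ∧ pvPal s st (2 * m + 1) := by
  obtain ⟨m, hm5, he, hp⟩ := pvExpand_sound s 5 (c - 1) (c + 1) 1
  have hv : pvEO s c = ((2 * m + 1 : Nat) : Int) := by simp [pvEO, he]; omega
  have hm3 : 3 ≤ m := by omega
  have hcm : (m : Int) ≤ c := by
    have := (hp (m - 1) (by omega)).1
    omega
  have hn : c + (m : Int) + 1 ≤ (s.length : Int) := by
    have := (hp (m - 1) (by omega)).2.1
    omega
  refine ⟨c.toNat - m, m, hm3, hm5, hv, by omega, ?_⟩
  rw [pvPal_odd_iff]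
  constructor
  · have e : c.toNat - m + m = c.toNat := by omega
    rw [e]
    have ec : c = ((c.toNat : Nat) : Int) := by omega
    rw [ec, PySem.List.pyGetD_natCast] at hcc
    exact hcc
  · intro j hj
    have h := (hp j hj).2.2
    have e1 : c - 1 - (j : Int) = ((c.toNat - m + (m - 1 - j) : Nat) : Int) := by push_cast; omega
    have e2 : c + 1 + (j : Int) = ((c.toNat - m + (m + 1 + j) : Nat) : Int) := by push_cast; omega
    rw [e1, e2] at h
    exact (pvPairOk_iff s _ _).mp h

-- a palindrome of even length 2d reaches value ≥ 2d at its center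
lemma pvEven_complete (s : List Char) (st d : Nat) (_hd3 : 3 ≤ d) (hd5 : d ≤ 5)
    (hb : st + 2 * d ≤ s.length) (hp : pvPal s st (2 * d)) :
    ((2 * d : Nat) : Int) ≤ pvEE s ((st : Int) + d) := by
  rw [pvPal_even_iff] at hp
  have h := pvExpand_complete s 5 ((st : Int) + d - 1) ((st : Int) + d) 0 d hd5 ?_
  · unfold pvEE
    push_cast
    omega
  · intro j hj
    have hq := hp j hj
    refine ⟨by omega, by omega, ?_⟩
    have e1 : (st : Int) + d - 1 - (j : Int) = ((st + (d - 1 - j) : Nat) : Int) := by push_cast; omega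
    have e2 : (st : Int) + d + (j : Int) = ((st + (d + j) : Nat) : Int) := by push_cast; omega
    rw [e1, e2]
    exact (pvPairOk_iff s _ _).mpr hq

-- a palindrome of odd length 2d+1 reaches value ≥ 2d+1 at its center, whose base passes the guard
lemma pvOdd_complete (s : List Char) (st d : Nat) (_hd3 : 3 ≤ d) (hd5 : d ≤ 5)
    (hb : st + (2 * d + 1) ≤ s.length) (hp : pvPal s st (2 * d + 1)) :
    (PySem.List.pyGetD s ((st : Int) + d) 'N' = pvComp (PySem.List.pyGetD s ((st : Int) + d) 'N')) ∧
    ((2 * d + 1 : Nat) : Int) ≤ pvEO s ((st : Int) + d) := by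
  rw [pvPal_odd_iff] at hp
  obtain ⟨hc, hq⟩ := hp
  constructor
  · have e : (st : Int) + d = ((st + d : Nat) : Int) := by push_cast; omega
    rw [e, PySem.List.pyGetD_natCast]
    exact hc
  · have h := pvExpand_complete s 5 ((st : Int) + d - 1) ((st : Int) + d + 1) 1 d hd5 ?_
    · unfold pvEO
      push_cast
      omega
    · intro j hj
      have hqq := hq j hj
      refine ⟨by omega, by omega, ?_⟩
      have e1 : (st : Int) + d - 1 - (j : Int) = ((st + (d - 1 - j) : Nat) : Int) := by push_cast; omega
      have e2 : (st : Int) + d + 1 + (j : Int) = ((st + (d + 1 + j) : Nat) : Int) := by push_cast; omega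
      rw [e1, e2]
      exact (pvPairOk_iff s _ _).mpr hqq

-- canonical forms of the two ports
def pvAres (s : List Char) : Int :=
  (PySem.List.pyRange 6 (min ((s.length : Int) + 1) 12) 1).foldl
    (fun (a L : Int) => if pvPA s L then max a L else a) 0

def pvBE (s : List Char) : Int :=
  (PySem.List.pyRange 1 (s.length : Int) 1).foldl
    (fun best c => if 6 ≤ pvEE s c then max best (pvEE s c) else best) 0

def pvBres (s : List Char) : Int :=
  (PySem.List.pyRange 0 (s.length : Int) 1).foldl
    (fun best c =>
      if (PySem.List.pyGetD s c 'N' = pvComp (PySem.List.pyGetD s c 'N')) ∧ 6 ≤ pvEO s c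
      then max best (pvEO s c) else best) (pvBE s)

lemma pvmain (s : List Char) : pvAres s = pvBres s := by
  have hBE0 : (0 : Int) ≤ pvBE s := pvLe_cmax_init (fun c => 6 ≤ pvEE s c) (pvEE s) _ 0
  have hB1 : pvBE s ≤ pvBres s :=
    pvLe_cmax_init (fun c => (PySem.List.pyGetD s c 'N' = pvComp (PySem.List.pyGetD s c 'N')) ∧ 6 ≤ pvEO s c) (pvEO s) _ _
  have hA0 : (0 : Int) ≤ pvAres s := pvLe_cmax_init (pvPA s) (fun L => L) _ 0
  apply le_antisymm
  · -- A ≤ B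
    refine pvCmax_le (pvPA s) (fun L => L) _ 0 (pvBres s) (by omega) ?_
    intro L hL hex
    show L ≤ pvBres s
    rw [PySem.List.mem_pyRange_one] at hL
    have hcast : L = ((L.toNat : Nat) : Int) := by omega
    rw [hcast] at hex
    obtain ⟨st, hb, hp⟩ := (pvPA_iff s L.toNat).mp hex
    have hL6 : 6 ≤ L.toNat := by omega
    have hL11 : L.toNat ≤ 11 := by omega
    rcases Nat.even_or_odd L.toNat with ⟨d, hdd⟩ | ⟨d, hdd⟩
    · have hd : L.toNat = 2 * d := by omega
      rw [hd] at hb hp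
      have hge := pvEven_complete s st d (by omega) (by omega) hb hp
      have hmem : ((st : Int) + d) ∈ PySem.List.pyRange 1 (s.length : Int) 1 := by
        rw [PySem.List.mem_pyRange_one]
        constructor
        · omega
        · omega
      have h6 : 6 ≤ pvEE s ((st : Int) + d) := by push_cast at hge; omega
      have h1 : pvEE s ((st : Int) + d) ≤ pvBE s :=
        pvLe_cmax_mem (fun c => 6 ≤ pvEE s c) (pvEE s) _ 0 _ hmem h6
      push_cast at hge
      omega
    · have hd : L.toNat = 2 * d + 1 := by omega
      rw [hd] at hb hp
      obtain ⟨hcc, hge⟩ := pvOdd_complete s st d (by omega) (by omega) hb hp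
      have hmem : ((st : Int) + d) ∈ PySem.List.pyRange 0 (s.length : Int) 1 := by
        rw [PySem.List.mem_pyRange_one]
        constructor
        · omega
        · omega
      have h6 : 6 ≤ pvEO s ((st : Int) + d) := by push_cast at hge; omega
      have h1 : pvEO s ((st : Int) + d) ≤ pvBres s :=
        pvLe_cmax_mem (fun c => (PySem.List.pyGetD s c 'N' = pvComp (PySem.List.pyGetD s c 'N')) ∧ 6 ≤ pvEO s c)
          (pvEO s) _ (pvBE s) _ hmem ⟨hcc, h6⟩
      push_cast at hge
      omega
  · -- B ≤ A
    refine pvCmax_le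
      (fun c => (PySem.List.pyGetD s c 'N' = pvComp (PySem.List.pyGetD s c 'N')) ∧ 6 ≤ pvEO s c)
      (pvEO s) _ (pvBE s) (pvAres s) ?_ ?_
    · -- even part ≤ A
      refine pvCmax_le (fun c => 6 ≤ pvEE s c) (pvEE s) _ 0 (pvAres s) hA0 ?_
      intro c hc h6
      rw [PySem.List.mem_pyRange_one] at hc
      obtain ⟨st, m, hm3, hm5, hv, hb, hp⟩ := pvEven_sound s c hc.1 h6
      have hmem : ((2 * m : Nat) : Int) ∈ PySem.List.pyRange 6 (min ((s.length : Int) + 1) 12) 1 := by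
        rw [PySem.List.mem_pyRange_one]
        constructor
        · push_cast
          omega
        · push_cast
          omega
      have hex : pvPA s ((2 * m : Nat) : Int) := (pvPA_iff s (2 * m)).mpr ⟨st, hb, hp⟩
      have := pvLe_cmax_mem (pvPA s) (fun L => L) (PySem.List.pyRange 6 (min ((s.length : Int) + 1) 12) 1) 0 _ hmem hex
      rw [hv]
      exact this
    · intro c hc hpc
      obtain ⟨hcc, h6⟩ := hpc
      rw [PySem.List.mem_pyRange_one] at hc
      obtain ⟨st, m, hm3, hm5, hv, hb, hp⟩ := pvOdd_sound s c hc.1 hc.2 hcc h6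
      have hmem : ((2 * m + 1 : Nat) : Int) ∈ PySem.List.pyRange 6 (min ((s.length : Int) + 1) 12) 1 := by
        rw [PySem.List.mem_pyRange_one]
        constructor
        · push_cast
          omega
        · push_cast
          omega
      have hex : pvPA s ((2 * m + 1 : Nat) : Int) := (pvPA_iff s (2 * m + 1)).mpr ⟨st, hb, hp⟩
      have := pvLe_cmax_mem (pvPA s) (fun L => L) (PySem.List.pyRange 6 (min ((s.length : Int) + 1) 12) 1) 0 _ hmem hex
      rw [hv]
      exact this

-- the ports compute the canonical forms
lemma pvA_eq (sequence : String) : check_palindromes sequence = pvAres sequence.toList := by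
  simp only [check_palindromes, PySem.List.len_eq]
  unfold pvAres
  refine PySem.List.foldl_congr_mem _ _ _ _ ?_
  intro acc L _
  exact pvFoldl_ifmax
    (fun stI => PySem.List.slice sequence.toList (some stI) (some (stI + L))
      = (PySem.List.slice sequence.toList (some stI) (some (stI + L))).reverse.map pvComp)
    L (PySem.List.pyRange 0 ((sequence.toList.length : Int) - L + 1) 1) acc

lemma pvB_eq (sequence : String) : check_palindromes_alt sequence = pvBres sequence.toList := by
  simp only [check_palindromes_alt, PySem.List.len_eq]
  unfold pvBres pvBE pvEE pvEO
  refine PySem.List.foldl_congr_mem _ _ _ _ ?_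
  intro acc c _
  by_cases h1 : PySem.List.pyGetD sequence.toList c 'N' = pvComp (PySem.List.pyGetD sequence.toList c 'N')
  · by_cases h2 : 6 ≤ ((pvExpand sequence.toList (c - 1) (c + 1) 1 5 : Nat) : Int)
    · rw [if_pos h1, if_pos h2, if_pos ⟨h1, h2⟩]
    · rw [if_pos h1, if_neg h2, if_neg (by tauto)]
  · rw [if_neg h1, if_neg (by tauto)]

-- ===== VERDICT (by name: the statement is the Claim_ definition above) =====
theorem check_palindromes_spec : Claim_equal_check_palindromes := by
  intro sequence _
  unfold Spec_check_palindromes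
  rw [pvA_eq, pvB_eq, pvmain]
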